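-- pv_equiv track=rewrite | github.com/vandmo/advent-of-code | 2024/21/parts.py | ways_from_YX
-- ===== SOURCE A (Python) =====
-- def ways_from_YX(grid, source, target):
--     result = ""
--     sx, sy = grid[source]
--     tx, ty = grid[target]
--     for y in range(min(sy, ty), max(sy, ty)):
--         if grid[" "] == (sx, y):
--             return None
--         elif sy < ty:
--             result += "v"
--         elif sy > ty:
--             result += "^"
--         else:
--             assert False
--     for x in range(min(sx, tx), max(sx, tx)):
--         if grid[" "] == (x, ty):
--             return None
--         elif sx < tx:
--             result += ">"
--         elif sx > tx:
--             result += "<"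
--         else:
--             assert False
--     return result + "A"
-- ===== SOURCE B (Python) =====
-- def ways_from_YX(grid, source, target):
--     sx, sy = grid[source]
--     tx, ty = grid[target]
--     if sy != ty:
--         bx, by = grid[" "]
--         if bx == sx and min(sy, ty) <= by < max(sy, ty):
--             return None
--     if sx != tx:
--         bx, by = grid[" "]
--         if by == ty and min(sx, tx) <= bx < max(sx, tx):
--             return None
--     vertical = "v" * (ty - sy) if sy < ty else "^" * (sy - ty)
--     horizontal = ">" * (tx - sx) if sx < tx else "<" * (sx - tx)
--     return vertical + horizontal + "A"
-- ===== Notes on version B (the rewrite author's own statement) =====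
-- stated objective: simpler
-- what changed: B replaces A's two per-cell loops (which compare the blank position against every cell stepped through and build the string one character at a time) by a single range-containment test per leg plus closed-form string repetition ('v'*dy etc.), reading grid[' '] only when the corresponding leg is non-empty.
import Mathlib
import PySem

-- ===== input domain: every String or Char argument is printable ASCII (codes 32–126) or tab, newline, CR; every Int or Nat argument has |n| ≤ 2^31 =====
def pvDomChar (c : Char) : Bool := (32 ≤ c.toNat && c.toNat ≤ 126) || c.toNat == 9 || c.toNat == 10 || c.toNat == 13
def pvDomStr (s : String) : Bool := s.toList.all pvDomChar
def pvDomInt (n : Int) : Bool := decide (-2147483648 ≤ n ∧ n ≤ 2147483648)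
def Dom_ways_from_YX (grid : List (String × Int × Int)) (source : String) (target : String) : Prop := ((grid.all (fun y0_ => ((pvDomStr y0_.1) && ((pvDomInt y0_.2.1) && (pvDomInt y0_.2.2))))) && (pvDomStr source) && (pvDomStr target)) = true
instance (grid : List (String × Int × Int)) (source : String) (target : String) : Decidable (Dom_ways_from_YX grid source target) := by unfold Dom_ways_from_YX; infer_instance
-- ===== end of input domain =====

-- B replaces A's per-cell loops (one blank comparison per step) by closed-form string
-- repetition and a single range-containment blank test per leg (objective: simpler).
-- grid is a dict String -> (Int × Int); lookup = first match in insertion order.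
def pvLookup (grid : List (String × Int × Int)) (k : String) : Option (Int × Int) :=
  (grid.find? (fun p => p.1 == k)).map (fun p => p.2)

-- ===== PORT A =====
-- second loop: for x in range(min(sx,tx), max(sx,tx)): …
def wfLoopH (grid : List (String × Int × Int)) (sx tx ty : Int) (xs : List Int) (result : String) : Option String :=
  match xs with
  | [] => some (result ++ "A")
  | x :: rest =>
      if pvLookup grid " " = some (x, ty) then none
      else if sx < tx then wfLoopH grid sx tx ty rest (result ++ ">")
      else if sx > tx then wfLoopH grid sx tx ty rest (result ++ "<")
      else none  -- Python 'assert False': unreachable (a nonempty range forces sx ≠ tx)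

-- first loop: for y in range(min(sy,ty), max(sy,ty)): …; falls through to the second loop
def wfLoopV (grid : List (String × Int × Int)) (sx sy tx ty : Int) (ys : List Int) (result : String) : Option String :=
  match ys with
  | [] => wfLoopH grid sx tx ty (PySem.List.pyRange (min sx tx) (max sx tx) 1) result
  | y :: rest =>
      if pvLookup grid " " = some (sx, y) then none
      else if sy < ty then wfLoopV grid sx sy tx ty rest (result ++ "v")
      else if sy > ty then wfLoopV grid sx sy tx ty rest (result ++ "^")
      else none  -- Python 'assert False': unreachable

def ways_from_YX (grid : List (String × Int × Int)) (source : String) (target : String) : Option String :=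
  match pvLookup grid source with
  | none => none  -- KeyError (excluded by Pre_)
  | some (sx, sy) =>
    match pvLookup grid target with
    | none => none  -- KeyError (excluded by Pre_)
    | some (tx, ty) =>
      wfLoopV grid sx sy tx ty (PySem.List.pyRange (min sy ty) (max sy ty) 1) ""

-- ===== PORT B =====
-- "c" * n  (n ≤ 0 gives "")
def wfRepeat (c : Char) (n : Int) : String := String.ofList (List.replicate n.toNat c)

-- bx == sx and min(sy,ty) <= by < max(sy,ty)
def wfBlankV (grid : List (String × Int × Int)) (sx sy ty : Int) : Bool :=
  match pvLookup grid " " with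
  | some (bx, b_y) => bx == sx && decide (min sy ty ≤ b_y) && decide (b_y < max sy ty)
  | none => false  -- KeyError (excluded by Pre_)

-- by == ty and min(sx,tx) <= bx < max(sx,tx)
def wfBlankH (grid : List (String × Int × Int)) (sx tx ty : Int) : Bool :=
  match pvLookup grid " " with
  | some (bx, b_y) => b_y == ty && decide (min sx tx ≤ bx) && decide (bx < max sx tx)
  | none => false  -- KeyError (excluded by Pre_)

def ways_from_YX_alt (grid : List (String × Int × Int)) (source : String) (target : String) : Option String :=
  match pvLookup grid source with
  | none => none  -- KeyError (excluded by Pre_)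
  | some (sx, sy) =>
    match pvLookup grid target with
    | none => none  -- KeyError (excluded by Pre_)
    | some (tx, ty) =>
      if (sy != ty) && wfBlankV grid sx sy ty then none
      else if (sx != tx) && wfBlankH grid sx tx ty then none
      else
        let vertical := if sy < ty then wfRepeat 'v' (ty - sy) else wfRepeat '^' (sy - ty)
        let horizontal := if sx < tx then wfRepeat '>' (tx - sx) else wfRepeat '<' (sx - tx)
        some (vertical ++ horizontal ++ "A")

-- ===== PRECONDITION & SPEC =====
-- Pre_ excludes exactly the inputs on which A raises KeyError: source or target not in grid,
-- or the two keys map to different positions (so a loop runs and reads grid[" "]) while " " is missing.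
def Pre_ways_from_YX (grid : List (String × Int × Int)) (source : String) (target : String) : Prop :=
  (pvLookup grid source).isSome = true ∧ (pvLookup grid target).isSome = true ∧
  (pvLookup grid source ≠ pvLookup grid target → (pvLookup grid " ").isSome = true)
instance (grid : List (String × Int × Int)) (source : String) (target : String) : Decidable (Pre_ways_from_YX grid source target) := by unfold Pre_ways_from_YX; infer_instance

def pvWitness_ways_from_YX : (List (String × Int × Int)) × String × String :=
  ([("7", 0, 0), ("8", 1, 0), (" ", 0, 3)], "7", "8")

def Spec_ways_from_YX (grid : List (String × Int × Int)) (source : String) (target : String) (out : Option String) : Prop := out = ways_from_YX_alt grid source target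
instance (grid : List (String × Int × Int)) (source : String) (target : String) (out : Option String) : Decidable (Spec_ways_from_YX grid source target out) := by unfold Spec_ways_from_YX; infer_instance

-- ===== CLAIM (what is proved, stated in full; the proofs are below) =====
def Claim_equal_ways_from_YX : Prop := ∀ (grid : List (String × Int × Int)) (source : String) (target : String), Dom_ways_from_YX grid source target → Pre_ways_from_YX grid source target → Spec_ways_from_YX grid source target (ways_from_YX grid source target)

-- ===== LEMMAS AND PROOFS =====


-- A's blank scan over a segment equals a range-containment test (V leg)
lemma anyV_eq (grid : List (String × Int × Int)) (sx sy ty : Int) :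
    ((PySem.List.pyRange (min sy ty) (max sy ty) 1).any
      (fun y => decide (pvLookup grid " " = some (sx, y))))
    = ((sy != ty) && wfBlankV grid sx sy ty) := by
  cases hb : pvLookup grid " " with
  | none => simp [wfBlankV, hb]
  | some p =>
    obtain ⟨bx, b_y⟩ := p
    rw [Bool.eq_iff_iff]
    simp only [wfBlankV, hb, List.any_eq_true,
      PySem.List.mem_pyRange_one, decide_eq_true_eq, Option.some.injEq, Prod.mk.injEq,
      Bool.and_eq_true, bne_iff_ne, ne_eq, beq_iff_eq]
    constructor
    · rintro ⟨y, ⟨h1, h2⟩, h3, h4⟩; exact ⟨by omega, ⟨by omega, by omega⟩, by omega⟩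
    · rintro ⟨h0, ⟨h3, h1⟩, h2⟩; exact ⟨b_y, ⟨h1, h2⟩, h3, rfl⟩

lemma anyH_eq (grid : List (String × Int × Int)) (sx tx ty : Int) :
    ((PySem.List.pyRange (min sx tx) (max sx tx) 1).any
      (fun x => decide (pvLookup grid " " = some (x, ty))))
    = ((sx != tx) && wfBlankH grid sx tx ty) := by
  cases hb : pvLookup grid " " with
  | none => simp [wfBlankH, hb]
  | some p =>
    obtain ⟨bx, b_y⟩ := p
    rw [Bool.eq_iff_iff]
    simp only [wfBlankH, hb, List.any_eq_true,
      PySem.List.mem_pyRange_one, decide_eq_true_eq, Option.some.injEq, Prod.mk.injEq,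
      Bool.and_eq_true, bne_iff_ne, ne_eq, beq_iff_eq]
    constructor
    · rintro ⟨x, ⟨h1, h2⟩, h3, h4⟩; exact ⟨by omega, ⟨by omega, by omega⟩, by omega⟩
    · rintro ⟨h0, ⟨h4, h1⟩, h2⟩; exact ⟨bx, ⟨h1, h2⟩, rfl, h4⟩

lemma wfLoopV_seg (grid : List (String × Int × Int)) (sx sy tx ty : Int) (hne : sy ≠ ty) :
    ∀ (n : ℕ) (a : Int) (r : String),
    wfLoopV grid sx sy tx ty (PySem.List.pyRange a (a + n) 1) r =
      if (PySem.List.pyRange a (a + n) 1).any (fun y => decide (pvLookup grid " " = some (sx, y)))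
      then none
      else wfLoopV grid sx sy tx ty []
        (r ++ String.ofList (List.replicate n (if sy < ty then 'v' else '^'))) := by
  intro n
  induction n with
  | zero =>
    intro a r
    simp [PySem.List.pyRange_one_eq_nil (le_refl a)]
  | succ n ih =>
    intro a r
    have hb : (a + ((n + 1 : ℕ) : ℤ)) = (a + 1) + (n : ℤ) := by push_cast; ring
    rw [hb, PySem.List.pyRange_one_cons (by omega)]
    by_cases hsp : pvLookup grid " " = some (sx, a)
    · simp [wfLoopV, hsp]
    · rcases lt_or_gt_of_ne hne with hlt | hgt
      · simp only [wfLoopV, if_pos hlt, List.any_cons,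
          hsp, ih]
        have : r ++ "v" ++ String.ofList (List.replicate n 'v')
            = r ++ String.ofList (List.replicate (n + 1) 'v') := by
          rw [← String.toList_inj]; simp [List.replicate_succ]
        rw [this]; simp only [decide_false, Bool.false_or, if_false]
      · simp only [wfLoopV, if_neg (by omega : ¬ sy < ty), if_pos hgt,
          List.any_cons, hsp, ih]
        have : r ++ "^" ++ String.ofList (List.replicate n '^')
            = r ++ String.ofList (List.replicate (n + 1) '^') := by
          rw [← String.toList_inj]; simp [List.replicate_succ]
        rw [this]; simp only [decide_false, Bool.false_or, if_false]

lemma wfLoopH_seg (grid : List (String × Int × Int)) (sx tx ty : Int) (hne : sx ≠ tx) :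
    ∀ (n : ℕ) (a : Int) (r : String),
    wfLoopH grid sx tx ty (PySem.List.pyRange a (a + n) 1) r =
      if (PySem.List.pyRange a (a + n) 1).any (fun x => decide (pvLookup grid " " = some (x, ty)))
      then none
      else some (r ++ String.ofList (List.replicate n (if sx < tx then '>' else '<')) ++ "A") := by
  intro n
  induction n with
  | zero =>
    intro a r
    simp [PySem.List.pyRange_one_eq_nil (le_refl a), wfLoopH]
  | succ n ih =>
    intro a r
    have hb : (a + ((n + 1 : ℕ) : ℤ)) = (a + 1) + (n : ℤ) := by push_cast; ring
    rw [hb, PySem.List.pyRange_one_cons (by omega)]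
    by_cases hsp : pvLookup grid " " = some (a, ty)
    · simp [wfLoopH, hsp]
    · rcases lt_or_gt_of_ne hne with hlt | hgt
      · simp only [wfLoopH, if_pos hlt, List.any_cons,
          hsp, ih]
        have : r ++ ">" ++ String.ofList (List.replicate n '>')
            = r ++ String.ofList (List.replicate (n + 1) '>') := by
          rw [← String.toList_inj]; simp [List.replicate_succ]
        rw [this]; simp only [decide_false, Bool.false_or, if_false]
      · simp only [wfLoopH, if_neg (by omega : ¬ sx < tx), if_pos hgt,
          List.any_cons, hsp, ih]
        have : r ++ "<" ++ String.ofList (List.replicate n '<')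
            = r ++ String.ofList (List.replicate (n + 1) '<') := by
          rw [← String.toList_inj]; simp [List.replicate_succ]
        rw [this]; simp only [decide_false, Bool.false_or, if_false]

lemma wfLoopH_range (grid : List (String × Int × Int)) (sx tx ty : Int) (r : String) :
    wfLoopH grid sx tx ty (PySem.List.pyRange (min sx tx) (max sx tx) 1) r =
      if (sx != tx) && wfBlankH grid sx tx ty then none
      else some (r ++ (if sx < tx then wfRepeat '>' (tx - sx) else wfRepeat '<' (sx - tx)) ++ "A") := by
  by_cases heq : sx = tx
  · subst heq
    simp [wfLoopH, wfRepeat, PySem.List.pyRange_one_eq_nil (le_refl sx)]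
  · have hmm : max sx tx = min sx tx + (((max sx tx - min sx tx).toNat : ℕ) : ℤ) := by omega
    conv_lhs => rw [hmm]
    rw [wfLoopH_seg grid sx tx ty heq]
    conv_lhs => rw [← hmm]
    rw [anyH_eq]
    rcases lt_or_gt_of_ne heq with hlt | hgt
    · simp [wfRepeat, min_eq_left hlt.le, max_eq_right hlt.le, hlt]
    · simp [wfRepeat, min_eq_right hgt.le, max_eq_left hgt.le, not_lt_of_gt hgt]

lemma wfLoopV_range (grid : List (String × Int × Int)) (sx sy tx ty : Int) (r : String) :
    wfLoopV grid sx sy tx ty (PySem.List.pyRange (min sy ty) (max sy ty) 1) r =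
      if (sy != ty) && wfBlankV grid sx sy ty then none
      else wfLoopV grid sx sy tx ty []
        (r ++ (if sy < ty then wfRepeat 'v' (ty - sy) else wfRepeat '^' (sy - ty))) := by
  by_cases heq : sy = ty
  · subst heq
    simp [PySem.List.pyRange_one_eq_nil (le_refl sy), wfRepeat]
  · have hmm : max sy ty = min sy ty + (((max sy ty - min sy ty).toNat : ℕ) : ℤ) := by omega
    conv_lhs => rw [hmm]
    rw [wfLoopV_seg grid sx sy tx ty heq]
    conv_lhs => rw [← hmm]
    rw [anyV_eq]
    rcases lt_or_gt_of_ne heq with hlt | hgt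
    · simp [wfRepeat, min_eq_left hlt.le, max_eq_right hlt.le, hlt]
    · simp [wfRepeat, min_eq_right hgt.le, max_eq_left hgt.le, not_lt_of_gt hgt]

-- ===== VERDICT (by name: the statement is the Claim_ definition above) =====
theorem ways_from_YX_spec : Claim_equal_ways_from_YX := by
  intro grid source target _hdom hpre
  unfold Spec_ways_from_YX ways_from_YX ways_from_YX_alt
  obtain ⟨hs, ht, _⟩ := hpre
  cases hsv : pvLookup grid source with
  | none => simp [hsv] at hs
  | some p =>
    cases htv : pvLookup grid target with
    | none => simp [htv] at ht
    | some q =>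
      obtain ⟨sx, sy⟩ := p
      obtain ⟨tx, ty⟩ := q
      dsimp only
      rw [wfLoopV_range]
      by_cases hv : ((sy != ty) && wfBlankV grid sx sy ty) = true
      · rw [if_pos hv, if_pos hv]
      · rw [if_neg hv, if_neg hv, wfLoopV, wfLoopH_range]
        by_cases hh : ((sx != tx) && wfBlankH grid sx tx ty) = true
        · rw [if_pos hh, if_pos hh]
        · rw [if_neg hh, if_neg hh]
          simp [String.append_assoc]
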